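-- pv_equiv track=rewrite | github.com/alexmlcode/telegram-invoice-reminder | ouroboros/typing_assistant.py | build_mapping
-- ===== SOURCE A (Python) =====
-- from typing import Any, Dict, List, Optional, Tuple
--
-- def build_mapping(
--     headers: List[str], form_fields: List[str]
-- ) -> Dict[str, str]:
--     """
--     Create CSV-column-to-form-field mapping.
--
--     Example:
--     - headers = ["name", "email", "address"]
--     - form_fields = ["fullName", "emailAddress", "streetAddress"]
--     - Returns {"name": "fullName", "email": "emailAddress", "address": "streetAddress"}
--     """
--     mapping = {}
--     for header in headers:
--         header_norm = header.lower().strip()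
--         best_match = None
--         best_score = -1
--         for field in form_fields:
--             field_norm = field.lower().strip()
--             # Simple scoring: exact match > partial match
--             if header_norm == field_norm:
--                 score = 2
--             elif header_norm in field_norm or field_norm in header_norm:
--                 score = 1
--             else:
--                 score = 0
--             if score > best_score:
--                 best_score = score
--                 best_match = field
--         if best_match and best_score >= 1:
--             mapping[header] = best_match
--     return mapping
-- ===== SOURCE B (Python) =====
-- def build_mapping(headers, form_fields):
--     mapping = {}
--     for header in headers:
--         header_norm = header.lower().strip()
--         best = next((f for f in form_fields if f.lower().strip() == header_norm), None)
--         if best is None: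
--             best = next(
--                 (f for f in form_fields
--                  if header_norm in f.lower().strip() or f.lower().strip() in header_norm),
--                 None,
--             )
--         if best:
--             mapping[header] = best
--     return mapping
-- ===== Notes on version B (the rewrite author's own statement) =====
-- stated objective: idiomatic
-- what changed: Replaces the running-max scoring loop over all fields with two short-circuiting first-match searches (exact first, then partial), exploiting that the score only takes values 2/1/0 and ties break to the first field.
import Mathlib
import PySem

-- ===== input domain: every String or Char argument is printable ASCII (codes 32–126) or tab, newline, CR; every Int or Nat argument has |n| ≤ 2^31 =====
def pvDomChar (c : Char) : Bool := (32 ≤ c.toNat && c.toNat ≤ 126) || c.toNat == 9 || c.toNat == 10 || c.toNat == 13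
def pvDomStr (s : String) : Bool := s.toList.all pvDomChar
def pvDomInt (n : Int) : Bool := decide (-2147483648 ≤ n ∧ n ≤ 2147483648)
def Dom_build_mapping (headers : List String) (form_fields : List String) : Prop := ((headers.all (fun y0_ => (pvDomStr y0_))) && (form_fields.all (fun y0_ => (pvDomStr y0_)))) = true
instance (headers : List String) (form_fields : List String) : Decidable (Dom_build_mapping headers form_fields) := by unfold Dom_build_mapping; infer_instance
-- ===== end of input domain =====

-- B replaces A's running-max scoring loop with two short-circuiting first-match searches (exact, then partial); same results, more idiomatic.

-- ===== PORT A =====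
def pvNorm (s : String) : String := PySem.Str.strip (PySem.Str.lower s)

-- one iteration of A's inner scoring loop, state = (best_match, best_score)
def pvScoreStep (header_norm : String) (st : Option String × Int) (field : String) : Option String × Int :=
  let field_norm := pvNorm field
  let score : Int :=
    if header_norm == field_norm then 2
    else if PySem.Str.isIn header_norm field_norm || PySem.Str.isIn field_norm header_norm then 1
    else 0
  if st.2 < score then (some field, score) else st

-- body of A's outer loop over headers
def pvRowA (form_fields : List String) (mapping : PySem.Dict String String) (header : String) : PySem.Dict String String :=
  match form_fields.foldl (pvScoreStep (pvNorm header)) ((none : Option String), (-1 : Int)) with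
  | (some best_match, best_score) =>
      if best_match ≠ "" ∧ 1 ≤ best_score then mapping.insert header best_match else mapping
  | (none, _) => mapping

def build_mapping (headers : List String) (form_fields : List String) : List (String × String) :=
  (headers.foldl (pvRowA form_fields) PySem.Dict.empty).items

-- ===== PORT B =====
-- body of B's loop over headers: first exact match, else first partial match
def pvRowB (form_fields : List String) (mapping : PySem.Dict String String) (header : String) : PySem.Dict String String :=
  match (match form_fields.find? (fun f => pvNorm f == pvNorm header) with
         | some f => some f
         | none => form_fields.find? (fun f =>
             PySem.Str.isIn (pvNorm header) (pvNorm f) || PySem.Str.isIn (pvNorm f) (pvNorm header))) with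
  | some f => if f ≠ "" then mapping.insert header f else mapping
  | none => mapping

def build_mapping_alt (headers : List String) (form_fields : List String) : List (String × String) :=
  (headers.foldl (pvRowB form_fields) PySem.Dict.empty).items

-- ===== PRECONDITION & SPEC =====
def Spec_build_mapping (headers : List String) (form_fields : List String) (out : List (String × String)) : Prop := out = build_mapping_alt headers form_fields
instance (headers : List String) (form_fields : List String) (out : List (String × String)) : Decidable (Spec_build_mapping headers form_fields out) := by unfold Spec_build_mapping; infer_instance

-- ===== CLAIM (what is proved, stated in full; the proofs are below) =====
def Claim_equal_build_mapping : Prop := ∀ (headers : List String) (form_fields : List String), Dom_build_mapping headers form_fields → Spec_build_mapping headers form_fields (build_mapping headers form_fields)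

-- ===== LEMMAS AND PROOFS =====

-- unfolding of one scoring step (lets zeta-reduced)
theorem pvStep_eval (hn f : String) (st : Option String × Int) :
    pvScoreStep hn st f =
      (if st.2 < (if hn == pvNorm f then (2 : Int)
                  else if PySem.Str.isIn hn (pvNorm f) || PySem.Str.isIn (pvNorm f) hn then 1 else 0)
       then (some f, (if hn == pvNorm f then (2 : Int)
                  else if PySem.Str.isIn hn (pvNorm f) || PySem.Str.isIn (pvNorm f) hn then 1 else 0))
       else st) := rfl

-- from state score 2 the loop never updates
theorem pvLoop_two (hn : String) (fs : List String) (m : String) :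
    fs.foldl (pvScoreStep hn) (some m, 2) = (some m, 2) := by
  induction fs with
  | nil => rfl
  | cons f fs ih =>
      simp only [List.foldl_cons]
      have hstep : pvScoreStep hn (some m, 2) f = (some m, 2) := by
        rw [pvStep_eval]; split_ifs <;> first | rfl | (exfalso; omega)
      rw [hstep, ih]

-- from state score 1 only an exact match updates
theorem pvLoop_one (hn : String) (fs : List String) (m : String) :
    fs.foldl (pvScoreStep hn) (some m, 1) =
      match fs.find? (fun f => hn == pvNorm f) with
      | some f => (some f, 2)
      | none => (some m, 1) := by
  induction fs generalizing m with
  | nil => rfl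
  | cons f fs ih =>
      simp only [List.foldl_cons]
      cases he : (hn == pvNorm f) with
      | true =>
          have hstep : pvScoreStep hn (some m, 1) f = (some f, 2) := by
            rw [pvStep_eval, he]; norm_num
          rw [hstep, pvLoop_two, List.find?_cons_of_pos (by simpa using he)]
      | false =>
          have hstep : pvScoreStep hn (some m, 1) f = (some m, 1) := by
            rw [pvStep_eval, he]; split_ifs <;> first | rfl | (exfalso; omega)
          rw [hstep, ih, List.find?_cons_of_neg (by simp [he])]

-- from state score 0 an exact or partial match updates
theorem pvLoop_zero (hn : String) (fs : List String) (m : String) :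
    fs.foldl (pvScoreStep hn) (some m, 0) =
      match fs.find? (fun f => hn == pvNorm f) with
      | some f => (some f, 2)
      | none =>
        match fs.find? (fun f => PySem.Str.isIn hn (pvNorm f) || PySem.Str.isIn (pvNorm f) hn) with
        | some f => (some f, 1)
        | none => (some m, 0) := by
  induction fs generalizing m with
  | nil => rfl
  | cons f fs ih =>
      simp only [List.foldl_cons]
      cases he : (hn == pvNorm f) with
      | true =>
          have hstep : pvScoreStep hn (some m, 0) f = (some f, 2) := by
            rw [pvStep_eval, he]; norm_num
          rw [hstep, pvLoop_two, List.find?_cons_of_pos (by simpa using he)]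
      | false =>
          cases hp : (PySem.Str.isIn hn (pvNorm f) || PySem.Str.isIn (pvNorm f) hn) with
          | true =>
              have hstep : pvScoreStep hn (some m, 0) f = (some f, 1) := by
                rw [pvStep_eval, he, hp]; norm_num
              rw [hstep, pvLoop_one, List.find?_cons_of_neg (by simp [he]),
                  List.find?_cons_of_pos (by simpa using hp)]
          | false =>
              have hstep : pvScoreStep hn (some m, 0) f = (some m, 0) := by
                rw [pvStep_eval, he, hp]; norm_num
              rw [hstep, ih, List.find?_cons_of_neg (by simp [he]),
                  List.find?_cons_of_neg (by simpa using hp)]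

-- characterisation of A's inner loop from its initial state
theorem pvLoop_start (hn : String) (fs : List String) :
    fs.foldl (pvScoreStep hn) (none, -1) =
      match fs.find? (fun f => hn == pvNorm f) with
      | some f => (some f, 2)
      | none =>
        match fs.find? (fun f => PySem.Str.isIn hn (pvNorm f) || PySem.Str.isIn (pvNorm f) hn) with
        | some f => (some f, 1)
        | none => match fs with | [] => (none, -1) | f :: _ => (some f, 0) := by
  cases fs with
  | nil => rfl
  | cons f fs =>
      simp only [List.foldl_cons]
      cases he : (hn == pvNorm f) with
      | true =>
          have hstep : pvScoreStep hn (none, -1) f = (some f, 2) := by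
            rw [pvStep_eval, he]; norm_num
          rw [hstep, pvLoop_two, List.find?_cons_of_pos (by simpa using he)]
      | false =>
          cases hp : (PySem.Str.isIn hn (pvNorm f) || PySem.Str.isIn (pvNorm f) hn) with
          | true =>
              have hstep : pvScoreStep hn (none, -1) f = (some f, 1) := by
                rw [pvStep_eval, he, hp]; norm_num
              rw [hstep, pvLoop_one, List.find?_cons_of_neg (by simp [he]),
                  List.find?_cons_of_pos (by simpa using hp)]
          | false =>
              have hstep : pvScoreStep hn (none, -1) f = (some f, 0) := by
                rw [pvStep_eval, he, hp]; norm_num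
              rw [hstep, pvLoop_zero, List.find?_cons_of_neg (by simp [he]),
                  List.find?_cons_of_neg (by simpa using hp)]

theorem pvRow_eq (fs : List String) (m : PySem.Dict String String) (h : String) :
    pvRowA fs m h = pvRowB fs m h := by
  unfold pvRowA pvRowB
  rw [pvLoop_start]
  have hfind : (fun f => pvNorm f == pvNorm h) = (fun f => pvNorm h == pvNorm f) := by
    funext f; simp [eq_comm]
  rw [hfind]
  cases hE : fs.find? (fun f => pvNorm h == pvNorm f) with
  | some f => simp
  | none =>
      cases hP : fs.find? (fun f => PySem.Str.isIn (pvNorm h) (pvNorm f) || PySem.Str.isIn (pvNorm f) (pvNorm h)) with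
      | some f => simp
      | none => cases fs <;> simp

-- ===== VERDICT (by name: the statement is the Claim_ definition above) =====
theorem build_mapping_spec : Claim_equal_build_mapping := by
  intro headers form_fields _
  unfold Spec_build_mapping build_mapping build_mapping_alt
  have : pvRowA form_fields = pvRowB form_fields :=
    funext fun m => funext fun h => pvRow_eq form_fields m h
  rw [this]
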